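-- pv_equiv track=rewrite | github.com/olgerbano/bioinformatics | lab3/ADN.py | number2
-- ===== SOURCE A (Python) =====
-- def number2(secv):
-- 	sum_A = 0;
-- 	sum_tot = 0;
-- 	for i in range(0,len(secv)):
-- 		if secv[i]=='A':
-- 			sum_A +=1;
-- 			sum_tot +=1;
-- 		if secv[i] == 'T':
-- 			sum_tot+=1;
-- 	return(sum_tot,sum_A);
-- ===== SOURCE B (Python) =====
-- def number2(secv):
--     a = len(secv) - len(secv.replace('A', ''))
--     t = len(secv) - len(secv.replace('T', ''))
--     return (a + t, a)
-- ===== Notes on version B (the rewrite author's own statement) =====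
-- stated objective: faster
-- what changed: Replaces the indexed counting loop with two running counters by deletion-length arithmetic: each count is the length drop after str.replace removes that letter (C-level scans instead of a Python-level per-character loop).
import Mathlib
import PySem

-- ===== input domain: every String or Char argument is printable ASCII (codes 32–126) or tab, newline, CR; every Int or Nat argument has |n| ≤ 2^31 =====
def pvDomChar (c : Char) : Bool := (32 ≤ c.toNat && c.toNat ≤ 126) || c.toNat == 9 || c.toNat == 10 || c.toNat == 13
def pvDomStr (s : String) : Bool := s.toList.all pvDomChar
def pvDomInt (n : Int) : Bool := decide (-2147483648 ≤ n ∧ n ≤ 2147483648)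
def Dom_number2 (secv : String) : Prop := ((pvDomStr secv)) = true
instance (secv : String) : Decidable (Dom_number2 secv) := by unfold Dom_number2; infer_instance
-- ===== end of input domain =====

-- B replaces A's indexed loop with two running counters by deletion-length arithmetic:
-- each count is the length drop after str.replace removes that letter (faster by constant factor: C-level scans).

-- ===== PORT A =====
-- indexed loop over range(0, len(secv)); state = (sum_A, sum_tot); two independent ifs in order
def number2 (secv : String) : Int × Int :=
  let cs := secv.toList
  let st := (PySem.List.pyRange 0 (PySem.Str.len secv) 1).foldl
    (fun (st : Int × Int) i =>
      let st := if PySem.List.pyGetD cs i ' ' = 'A' then (st.1 + 1, st.2 + 1) else st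
      if PySem.List.pyGetD cs i ' ' = 'T' then (st.1, st.2 + 1) else st)
    (0, 0)
  (st.2, st.1)

-- ===== PORT B =====
def number2_alt (secv : String) : Int × Int :=
  let a : Int := (PySem.Str.len secv : Int) - (PySem.Str.len (PySem.Str.replace secv "A" "") : Int)
  let t : Int := (PySem.Str.len secv : Int) - (PySem.Str.len (PySem.Str.replace secv "T" "") : Int)
  (a + t, a)

-- ===== PRECONDITION & SPEC =====
def Spec_number2 (secv : String) (out : Int × Int) : Prop := out = number2_alt secv
instance (secv : String) (out : Int × Int) : Decidable (Spec_number2 secv out) := by unfold Spec_number2; infer_instance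

-- ===== CLAIM (what is proved, stated in full; the proofs are below) =====
def Claim_equal_number2 : Prop := ∀ (secv : String), Dom_number2 secv → Spec_number2 secv (number2 secv)

-- ===== LEMMAS AND PROOFS =====
-- invariant of A's loop body folded over the character list
theorem pvFoldInv (cs : List Char) (a t : Int) :
    cs.foldl (fun (st : Int × Int) c =>
      let st := if c = 'A' then (st.1 + 1, st.2 + 1) else st
      if c = 'T' then (st.1, st.2 + 1) else st) (a, t)
    = (a + cs.count 'A', t + cs.count 'A' + cs.count 'T') := by
  induction cs generalizing a t with
  | nil => simp
  | cons c cs ih =>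
    simp only [List.foldl_cons, List.count_cons]
    by_cases hA : c = 'A' <;> by_cases hT : c = 'T' <;>
      simp [hA, hT, ih] <;> (try exact absurd (hA.symm.trans hT) (by decide)) <;> omega

-- replace.go with a single-char pattern and empty replacement is filter (given enough fuel)
theorem pvGoFilter (v : Char) (l : List Char) (fuel : Nat) (acc : List Char)
    (h : l.length ≤ fuel) :
    PySem.Chars.replace.go [v] [] fuel l acc = acc.reverse ++ l.filter (· ≠ v) := by
  induction l generalizing fuel acc with
  | nil => cases fuel <;> simp [PySem.Chars.replace.go]
  | cons c t ih =>
    cases fuel with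
    | zero => simp at h
    | succ n =>
      rw [PySem.Chars.replace.go]
      by_cases hc : c = v
      · simp [List.isPrefixOf, hc, ih _ _ (by simpa using Nat.le_of_succ_le_succ h)]
      · simp [List.isPrefixOf, hc, Ne.symm hc,
          ih _ _ (by simpa using Nat.le_of_succ_le_succ h), List.filter_cons]

theorem pvReplaceDel (cs : List Char) (v : Char) :
    PySem.Chars.replace cs [v] [] = cs.filter (· ≠ v) := by
  rw [PySem.Chars.replace]
  simp [pvGoFilter v cs cs.length [] le_rfl]

-- deletion-length arithmetic equals the count
theorem pvLenDel (cs : List Char) (v : Char) :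
    (cs.length : Int) - ((cs.filter (· ≠ v)).length : Int) = cs.count v := by
  have h : cs.length = (cs.filter (· ≠ v)).length + cs.count v := by
    induction cs with
    | nil => simp
    | cons c t ih =>
      by_cases hc : c = v <;> simp [List.filter_cons, hc, List.count_cons, ih] <;> omega
  omega

-- ===== VERDICT (by name: the statement is the Claim_ definition above) =====
theorem number2_spec : Claim_equal_number2 := by
  intro secv _
  show number2 secv = number2_alt secv
  simp only [number2, number2_alt]
  rw [show PySem.Str.len secv = PySem.List.len secv.toList from by
        simp [PySem.Str.len_eq, PySem.List.len_eq],
      PySem.List.foldl_pyRange_pyGetD (xs := secv.toList) (d := ' ')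
        (f := fun (st : Int × Int) c =>
          let st := if c = 'A' then (st.1 + 1, st.2 + 1) else st
          if c = 'T' then (st.1, st.2 + 1) else st)
        (init := ((0 : Int), (0 : Int))) (a := 0) (by omega)]
  simp only [pvFoldInv, PySem.Str.replace, PySem.Str.len_eq,
    PySem.List.len_eq, String.toList_ofList]
  rw [show ("A" : String).toList = ['A'] from rfl, show ("T" : String).toList = ['T'] from rfl,
     show ("" : String).toList = [] from rfl, pvReplaceDel, pvReplaceDel]
  simp only [Prod.mk.injEq, pvLenDel, Int.toNat_zero, List.drop_zero]
  constructor <;> omega
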